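-- pv_equiv track=rewrite | github.com/aturrisi-2/genesi | core/engines.py | _get_relevance_context
-- ===== SOURCE A (Python) =====
-- def _get_relevance_context(sentence: str, location: str) -> str:
--     """Genera contesto di rilevanza per la località"""
--     location_lower = location.lower()
--     sentence_lower = sentence.lower()
--
--     # Pattern di rilevanza per Roma
--     if location_lower == "roma":
--         if any(word in sentence_lower for word in ["centro", "storico", "colosseo", "vaticano"]):
--             return "Questo interessa chi vive o visita il centro storico. "
--         elif any(word in sentence_lower for word in ["metro", "bus", "traffico", "spostamenti"]):
--             return "Questo potrebbe cambiare gli spostamenti quotidiani. "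
--         elif any(word in sentence_lower for word in ["comune", "sindaco", "municipio", "decisione"]):
--             return "Questa decisione amministrativa riguarda tutti i residenti. "
--         elif any(word in sentence_lower for word in ["lavori", "intervento", "manutenzione"]):
--             return "Questi lavori potrebbero causare disagi alla circolazione. "
--         else:
--             return f"Questa notizia è rilevante per chi vive a {location}. "
--
--     # Pattern di rilevanza per altre città
--     elif any(word in sentence_lower for word in ["metro", "bus", "traffico"]):
--         return "Questo potrebbe impattare la mobilità urbana. "
--     elif any(word in sentence_lower for word in ["comune", "sindaco"]):
--         return "Questa decisione amministrativa riguarda i cittadini. "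
--     else:
--         return f"Questo evento è importante per {location}. "
-- ===== SOURCE B (Python) =====
-- # B: instead of an ordered if/elif chain with early exit, scan every keyword once,
-- # collect the priority rank of each keyword found in the sentence, and answer with
-- # the response for the minimum rank (or the location default when nothing matched).
--
-- ROMA_KEYWORD_RANK = {
--     "centro": 0, "storico": 0, "colosseo": 0, "vaticano": 0,
--     "metro": 1, "bus": 1, "traffico": 1, "spostamenti": 1,
--     "comune": 2, "sindaco": 2, "municipio": 2, "decisione": 2,
--     "lavori": 3, "intervento": 3, "manutenzione": 3,
-- }
--
-- ROMA_RESPONSES = [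
--     "Questo interessa chi vive o visita il centro storico. ",
--     "Questo potrebbe cambiare gli spostamenti quotidiani. ",
--     "Questa decisione amministrativa riguarda tutti i residenti. ",
--     "Questi lavori potrebbero causare disagi alla circolazione. ",
-- ]
--
-- GENERIC_KEYWORD_RANK = {
--     "metro": 0, "bus": 0, "traffico": 0,
--     "comune": 1, "sindaco": 1,
-- }
--
-- GENERIC_RESPONSES = [
--     "Questo potrebbe impattare la mobilità urbana. ",
--     "Questa decisione amministrativa riguarda i cittadini. ",
-- ]
--
--
-- def _get_relevance_context(sentence: str, location: str) -> str:
--     sentence_lower = sentence.lower()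
--     if location.lower() == "roma":
--         ranks = [r for w, r in ROMA_KEYWORD_RANK.items() if w in sentence_lower]
--         if ranks:
--             return ROMA_RESPONSES[min(ranks)]
--         return f"Questa notizia è rilevante per chi vive a {location}. "
--     ranks = [r for w, r in GENERIC_KEYWORD_RANK.items() if w in sentence_lower]
--     if ranks:
--         return GENERIC_RESPONSES[min(ranks)]
--     return f"Questo evento è importante per {location}. "
-- ===== Notes on version B (the rewrite author's own statement) =====
-- stated objective: alternative
-- what changed: Replaces the ordered if/elif chain with early exit by a single scan over a keyword-to-priority-rank dict that collects the ranks of all matching keywords and indexes a response table by the minimum rank.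
import Mathlib
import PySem

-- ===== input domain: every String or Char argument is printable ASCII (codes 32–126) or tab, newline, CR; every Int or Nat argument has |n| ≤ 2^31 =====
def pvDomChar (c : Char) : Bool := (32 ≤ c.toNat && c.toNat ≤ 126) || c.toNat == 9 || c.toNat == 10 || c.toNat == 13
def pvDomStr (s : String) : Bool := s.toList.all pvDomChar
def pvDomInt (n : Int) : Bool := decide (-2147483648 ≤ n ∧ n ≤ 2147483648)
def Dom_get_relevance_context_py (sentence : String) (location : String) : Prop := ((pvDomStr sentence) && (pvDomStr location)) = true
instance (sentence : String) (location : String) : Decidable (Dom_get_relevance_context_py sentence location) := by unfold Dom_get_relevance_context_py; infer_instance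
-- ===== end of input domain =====

-- B replaces A's ordered if/elif chain (early exit) by one scan of a keyword-to-rank
-- map that collects the ranks of all matching keywords and takes the minimum
-- (objective: alternative).


-- ===== PORT A =====
def get_relevance_context_py (sentence : String) (location : String) : String :=
  let location_lower := PySem.Str.lower location
  let sentence_lower := PySem.Str.lower sentence
  if location_lower == "roma" then
    if (["centro", "storico", "colosseo", "vaticano"].any
        (fun word => PySem.Str.isIn word sentence_lower)) then
      "Questo interessa chi vive o visita il centro storico. "
    else if (["metro", "bus", "traffico", "spostamenti"].any
        (fun word => PySem.Str.isIn word sentence_lower)) then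
      "Questo potrebbe cambiare gli spostamenti quotidiani. "
    else if (["comune", "sindaco", "municipio", "decisione"].any
        (fun word => PySem.Str.isIn word sentence_lower)) then
      "Questa decisione amministrativa riguarda tutti i residenti. "
    else if (["lavori", "intervento", "manutenzione"].any
        (fun word => PySem.Str.isIn word sentence_lower)) then
      "Questi lavori potrebbero causare disagi alla circolazione. "
    else
      "Questa notizia è rilevante per chi vive a " ++ location ++ ". "
  else if (["metro", "bus", "traffico"].any
      (fun word => PySem.Str.isIn word sentence_lower)) then
    "Questo potrebbe impattare la mobilità urbana. "
  else if (["comune", "sindaco"].any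
      (fun word => PySem.Str.isIn word sentence_lower)) then
    "Questa decisione amministrativa riguarda i cittadini. "
  else
    "Questo evento è importante per " ++ location ++ ". "

-- ===== PORT B =====
def pvRomaKeywordRank : List (String × Nat) :=
  [("centro", 0), ("storico", 0), ("colosseo", 0), ("vaticano", 0),
   ("metro", 1), ("bus", 1), ("traffico", 1), ("spostamenti", 1),
   ("comune", 2), ("sindaco", 2), ("municipio", 2), ("decisione", 2),
   ("lavori", 3), ("intervento", 3), ("manutenzione", 3)]

def pvRomaResponses : List String :=
  ["Questo interessa chi vive o visita il centro storico. ",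
   "Questo potrebbe cambiare gli spostamenti quotidiani. ",
   "Questa decisione amministrativa riguarda tutti i residenti. ",
   "Questi lavori potrebbero causare disagi alla circolazione. "]

def pvGenericKeywordRank : List (String × Nat) :=
  [("metro", 0), ("bus", 0), ("traffico", 0), ("comune", 1), ("sindaco", 1)]

def pvGenericResponses : List String :=
  ["Questo potrebbe impattare la mobilità urbana. ",
   "Questa decisione amministrativa riguarda i cittadini. "]

-- the list comprehension of B: ranks of all keywords that occur in the sentence
def pvRanks (keymap : List (String × Nat)) (sentence_lower : String) : List Nat :=
  (keymap.filter (fun kv => PySem.Str.isIn kv.1 sentence_lower)).map Prod.snd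

def get_relevance_context_py_alt (sentence : String) (location : String) : String :=
  let sentence_lower := PySem.Str.lower sentence
  if PySem.Str.lower location == "roma" then
    match PySem.List.min? (pvRanks pvRomaKeywordRank sentence_lower) (fun x => x) with
    | some m => pvRomaResponses.getD m ""
    | none => "Questa notizia è rilevante per chi vive a " ++ location ++ ". "
  else
    match PySem.List.min? (pvRanks pvGenericKeywordRank sentence_lower) (fun x => x) with
    | some m => pvGenericResponses.getD m ""
    | none => "Questo evento è importante per " ++ location ++ ". "

-- ===== PRECONDITION & SPEC =====
def Spec_get_relevance_context_py (sentence : String) (location : String) (out : String) : Prop := out = get_relevance_context_py_alt sentence location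
instance (sentence : String) (location : String) (out : String) : Decidable (Spec_get_relevance_context_py sentence location out) := by unfold Spec_get_relevance_context_py; infer_instance

-- ===== CLAIM (what is proved, stated in full; the proofs are below) =====
def Claim_equal_get_relevance_context_py : Prop := ∀ (sentence : String) (location : String), Dom_get_relevance_context_py sentence location → Spec_get_relevance_context_py sentence location (get_relevance_context_py sentence location)

-- ===== LEMMAS AND PROOFS =====

-- foldl min keeps the accumulator when it is a lower bound of the list
lemma pv_foldl_min_of_le (l : List Nat) (a : Nat) (h : ∀ x ∈ l, a ≤ x) :
    l.foldl min a = a := by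
  induction l generalizing a with
  | nil => rfl
  | cons x t ih =>
    simp only [List.foldl_cons]
    have hax : a ≤ x := h x (by simp)
    rw [min_eq_left hax]
    exact ih a (fun y hy => h y (by simp [hy]))

-- min? over a block of equal ranks followed by larger-or-equal ranks
lemma pv_min?_block (l1 l2 : List Nat) (r : Nat)
    (h1 : ∀ x ∈ l1, x = r) (h2 : ∀ x ∈ l2, r ≤ x) :
    PySem.List.min? (l1 ++ l2) (fun x => x)
      = if l1 = [] then PySem.List.min? l2 (fun x => x) else some r := by
  cases l1 with
  | nil => simp
  | cons a t =>
    have ha : a = r := h1 a (by simp)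
    simp only [List.cons_append, PySem.List.min?_id_cons,
      if_neg (by simp : (a :: t : List Nat) ≠ [])]
    subst ha
    rw [pv_foldl_min_of_le]
    intro x hx
    rcases List.mem_append.mp hx with h | h
    · exact le_of_eq (h1 x (by simp [h])).symm
    · exact h2 x h

-- ranks of one keyword group, as a constant-rank block
lemma pv_ranks_map_const (g : List String) (r : Nat) (s : String) :
    pvRanks (g.map (fun w => (w, r))) s
      = (g.filter (fun w => PySem.Str.isIn w s)).map (fun _ => r) := by
  induction g with
  | nil => rfl
  | cons w t ih =>
    by_cases h : PySem.Str.isIn w s = true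
    · simp only [pvRanks, List.map_cons, List.filter_cons, h, if_true] at ih ⊢
      exact congrArg (List.cons r) ih
    · have h' : PySem.Str.isIn w s = false := by simpa using h
      simp only [pvRanks, List.map_cons, List.filter_cons, h', Bool.false_eq_true,
        if_false] at ih ⊢
      exact ih

lemma pv_ranks_append (k1 k2 : List (String × Nat)) (s : String) :
    pvRanks (k1 ++ k2) s = pvRanks k1 s ++ pvRanks k2 s := by
  simp [pvRanks, List.filter_append]

-- membership facts for blocks
lemma pv_mem_block (p : String → Bool) (g : List String) (r : Nat) :
    ∀ x ∈ (g.filter p).map (fun _ => r), x = r := by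
  intro x hx
  rcases List.mem_map.mp hx with ⟨w, _, hw⟩
  exact hw.symm

-- one reduction step: a keyword group's block is the minimum iff the group matches
lemma pv_min_step (p : String → Bool) (g : List String) (r : Nat) (rest : List Nat)
    (hrest : ∀ x ∈ rest, r ≤ x) :
    PySem.List.min? ((g.filter p).map (fun _ => r) ++ rest) (fun x => x)
      = if g.any p then some r else PySem.List.min? rest (fun x => x) := by
  rw [pv_min?_block _ rest r (pv_mem_block p g r) hrest]
  by_cases h : g.any p = true
  · rw [if_pos h, if_neg]
    intro hnil
    have : g.any p = false := by
      simpa [List.filter_eq_nil_iff, List.any_eq_false] using hnil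
    simp [this] at h
  · have hf : g.any p = false := by simpa using h
    rw [if_pos, if_neg (by simp [hf])]
    simp [List.filter_eq_nil_iff, List.any_eq_false] at hf ⊢
    exact hf

-- last block alone: its rank is the minimum iff the group matches, else no rank at all
lemma pv_min_last (p : String → Bool) (g : List String) (r : Nat) :
    PySem.List.min? ((g.filter p).map (fun _ => r)) (fun x => x)
      = if g.any p then some r else none := by
  rw [← List.append_nil ((g.filter p).map (fun _ => r)),
    pv_min_step p g r [] (fun x hx => absurd hx (by simp))]
  by_cases h : g.any p = true <;> simp [h, PySem.List.min?]

-- ===== VERDICT (by name: the statement is the Claim_ definition above) =====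
theorem get_relevance_context_py_spec : Claim_equal_get_relevance_context_py := by
  intro sentence location _
  unfold Spec_get_relevance_context_py get_relevance_context_py get_relevance_context_py_alt
  dsimp only
  set sl := PySem.Str.lower sentence with hsl
  set p : String → Bool := fun w => PySem.Str.isIn w sl with hp
  by_cases hloc : (PySem.Str.lower location == "roma") = true
  · -- roma branch
    have hk : pvRomaKeywordRank
        = (["centro","storico","colosseo","vaticano"].map (fun w => (w, (0:Nat))))
          ++ ((["metro","bus","traffico","spostamenti"].map (fun w => (w, (1:Nat))))
          ++ ((["comune","sindaco","municipio","decisione"].map (fun w => (w, (2:Nat))))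
          ++ (["lavori","intervento","manutenzione"].map (fun w => (w, (3:Nat)))))) := rfl
    have hranks : pvRanks pvRomaKeywordRank sl
        = ((["centro","storico","colosseo","vaticano"].filter p).map (fun _ => (0:Nat)))
          ++ (((["metro","bus","traffico","spostamenti"].filter p).map (fun _ => (1:Nat)))
          ++ (((["comune","sindaco","municipio","decisione"].filter p).map (fun _ => (2:Nat)))
          ++ ((["lavori","intervento","manutenzione"].filter p).map (fun _ => (3:Nat))))) := by
      rw [hk, pv_ranks_append, pv_ranks_append, pv_ranks_append,
        pv_ranks_map_const, pv_ranks_map_const, pv_ranks_map_const, pv_ranks_map_const]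
    rw [hranks]
    rw [pv_min_step p _ 0 _ (by
      intro x hx; exact Nat.zero_le x)]
    rw [pv_min_step p _ 1 _ (by
      intro x hx
      rcases List.mem_append.mp hx with h | h
      · have := pv_mem_block p _ 2 x h; omega
      · have := pv_mem_block p _ 3 x h; omega)]
    rw [pv_min_step p _ 2 _ (by
      intro x hx; have := pv_mem_block p _ 3 x hx; omega)]
    rw [pv_min_last p _ 3]
    rw [if_pos hloc]
    split_ifs <;> rfl
  · -- generic branch
    have hk : pvGenericKeywordRank
        = (["metro","bus","traffico"].map (fun w => (w, (0:Nat))))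
          ++ (["comune","sindaco"].map (fun w => (w, (1:Nat)))) := rfl
    have hranks : pvRanks pvGenericKeywordRank sl
        = ((["metro","bus","traffico"].filter p).map (fun _ => (0:Nat)))
          ++ ((["comune","sindaco"].filter p).map (fun _ => (1:Nat))) := by
      rw [hk, pv_ranks_append, pv_ranks_map_const, pv_ranks_map_const]
    rw [hranks]
    rw [pv_min_step p _ 0 _ (by intro x hx; exact Nat.zero_le x)]
    rw [pv_min_last p _ 1]
    rw [if_neg hloc]
    split_ifs <;> rfl
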